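-- pv_equiv track=rewrite | github.com/LJKelly3141/course-scheduler | backend/app/api/routes/analytics.py | _parse_pattern_days
-- ===== SOURCE A (Python) =====
-- def _parse_pattern_days(pattern: str) -> list:
--     """Parse meeting pattern like 'M W F' or 'T TH' into day codes."""
--     tokens = pattern.upper().split()
--     days: list = []
--     for t in tokens:
--         if t == "TH":
--             days.append("Th")
--         elif t in ("M", "T", "W", "F", "S", "U"):
--             days.append(t if t != "T" else "T")
--             if t == "T":
--                 days[-1] = "T"
--         elif len(t) > 1:
--             i = 0
--             while i < len(t):
--                 if i + 1 < len(t) and t[i:i + 2] == "TH":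
--                     days.append("Th")
--                     i += 2
--                 elif t[i] in "MTWFSU":
--                     days.append(t[i])
--                     i += 1
--                 else:
--                     i += 1
--     return days
-- ===== SOURCE B (Python) =====
-- import re
--
-- _DAY_RE = re.compile(r'TH|[MTWFSU]')
--
-- def _parse_pattern_days(pattern: str) -> list:
--     """Parse meeting pattern like 'M W F' or 'T TH' into day codes."""
--     return ['Th' if m == 'TH' else m for m in _DAY_RE.findall(pattern.upper())]
-- ===== Notes on version B (the rewrite author's own statement) =====
-- stated objective: idiomatic
-- what changed: Replaced the split-into-tokens plus per-token branch/inner-while scan with a single regex findall (r'TH|[MTWFSU]') over the uppercased string, mapping 'TH' to 'Th' in a comprehension.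
import Mathlib
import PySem

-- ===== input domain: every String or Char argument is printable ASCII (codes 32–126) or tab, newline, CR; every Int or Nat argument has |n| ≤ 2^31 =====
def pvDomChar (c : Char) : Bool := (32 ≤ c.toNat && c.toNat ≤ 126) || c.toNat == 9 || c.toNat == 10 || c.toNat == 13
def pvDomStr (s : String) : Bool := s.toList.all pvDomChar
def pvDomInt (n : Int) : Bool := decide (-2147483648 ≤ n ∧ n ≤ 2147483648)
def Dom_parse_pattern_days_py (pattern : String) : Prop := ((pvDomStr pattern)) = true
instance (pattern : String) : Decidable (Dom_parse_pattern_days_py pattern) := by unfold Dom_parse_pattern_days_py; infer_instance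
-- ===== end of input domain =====

-- B replaces A's token split + per-token branch/scan with a single regex-style left-to-right
-- scan of the uppercased string ('TH' tried before a single day letter); objective: idiomatic/simpler.

-- ===== PORT A =====
def pvDayChars : List Char := ['M', 'T', 'W', 'F', 'S', 'U']

-- A's inner `while i < len(t)` loop; `t[i:i+2]` is ported as (t.drop i).take 2, exact for 0 ≤ i.
def pvScanA (t : List Char) (i : Nat) (days : List String) : List String :=
  if h : i < t.length then
    if i + 1 < t.length ∧ (t.drop i).take 2 = ['T', 'H'] then
      pvScanA t (i + 2) (days ++ ["Th"])
    else if t[i] ∈ pvDayChars then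
      pvScanA t (i + 1) (days ++ [String.ofList [t[i]]])
    else
      pvScanA t (i + 1) days
  else days
termination_by t.length - i

-- the body of A's `for t in tokens` loop
def pvStepA (days : List String) (t : String) : List String :=
  if t = "TH" then days ++ ["Th"]
  else if t = "M" ∨ t = "T" ∨ t = "W" ∨ t = "F" ∨ t = "S" ∨ t = "U" then
    -- days.append(t if t != "T" else "T"); if t == "T": days[-1] = "T"
    let days' := days ++ [if t ≠ "T" then t else "T"]
    if t = "T" then days'.set (days'.length - 1) "T" else days'
  else if 1 < PySem.Str.len t then
    pvScanA t.toList 0 days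
  else days

def parse_pattern_days_py (pattern : String) : List String :=
  let tokens := PySem.Str.split₀ (PySem.Str.upper pattern)
  tokens.foldl pvStepA []

-- ===== PORT B =====
-- The regex scan of re.findall(r'TH|[MTWFSU]', …): at each position try 'TH' first, then a
-- single day letter, else advance one char; the comprehension's 'TH' → 'Th' is applied to a match.
def pvScanB : List Char → List String
  | [] => []
  | [c] => if c ∈ pvDayChars then [String.ofList [c]] else []
  | c :: d :: rest =>
    if c = 'T' ∧ d = 'H' then "Th" :: pvScanB rest
    else if c ∈ pvDayChars then String.ofList [c] :: pvScanB (d :: rest)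
    else pvScanB (d :: rest)

def parse_pattern_days_py_alt (pattern : String) : List String :=
  pvScanB (PySem.Str.upper pattern).toList

-- ===== PRECONDITION & SPEC =====
def Spec_parse_pattern_days_py (pattern : String) (out : List String) : Prop := out = parse_pattern_days_py_alt pattern
instance (pattern : String) (out : List String) : Decidable (Spec_parse_pattern_days_py pattern out) := by unfold Spec_parse_pattern_days_py; infer_instance

-- ===== CLAIM (what is proved, stated in full; the proofs are below) =====
def Claim_equal_parse_pattern_days_py : Prop := ∀ (pattern : String), Dom_parse_pattern_days_py pattern → Spec_parse_pattern_days_py pattern (parse_pattern_days_py pattern)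

-- ===== LEMMAS AND PROOFS =====

-- simple recursive characterisation of Python's whitespace split
def pvWsplit : List Char → List (List Char)
  | [] => []
  | c :: s =>
    if PySem.Chars.isspace c then pvWsplit s
    else (c :: s.takeWhile (fun ch => !PySem.Chars.isspace ch)) ::
      pvWsplit (s.dropWhile (fun ch => !PySem.Chars.isspace ch))
termination_by l => l.length
decreasing_by
  · simp
  · exact Nat.lt_succ_of_le (List.length_dropWhile_le _ _)

theorem pvGo_eq (s cur acc) :
    PySem.Chars.split₀.go s cur acc =
      acc.reverse ++
        (if cur.isEmpty then pvWsplit s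
         else (cur.reverse ++ s.takeWhile (fun ch => !PySem.Chars.isspace ch)) ::
           pvWsplit (s.dropWhile (fun ch => !PySem.Chars.isspace ch))) := by
  induction s generalizing cur acc with
  | nil =>
    rw [PySem.Chars.split₀.go]
    by_cases hc : cur.isEmpty <;> simp [hc, pvWsplit]
  | cons c rest ih =>
    rw [PySem.Chars.split₀.go]
    by_cases hsp : PySem.Chars.isspace c
    · by_cases hc : cur.isEmpty
      · simp only [hsp, if_true, hc, if_true, ih]
        simp [pvWsplit, hsp, hc]
      · simp only [hsp, if_true, hc, if_false, ih]
        simp [pvWsplit, hsp, List.takeWhile, List.dropWhile, hc]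
    · simp only [hsp, if_false, ih]
      by_cases hc : cur.isEmpty
      · have : cur = [] := by simpa using hc
        subst this
        simp [pvWsplit, hsp, List.takeWhile, List.dropWhile]
      · simp [pvWsplit, hsp, hc, List.takeWhile, List.dropWhile]

theorem pvSplit₀_eq (u : List Char) : PySem.Chars.split₀ u = pvWsplit u := by
  simpa using pvGo_eq u [] []

theorem pvSpace_not_day {c : Char} (h : PySem.Chars.isspace c = true) : c ∉ pvDayChars := by
  intro hm
  fin_cases hm <;> exact absurd h (by decide)

theorem pvSpace_ne_T {c : Char} (h : PySem.Chars.isspace c = true) : c ≠ 'T' := by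
  rintro rfl; exact absurd h (by decide)

theorem pvSpace_ne_H {c : Char} (h : PySem.Chars.isspace c = true) : c ≠ 'H' := by
  rintro rfl; exact absurd h (by decide)

theorem pvScanB_space {c : Char} (s : List Char) (h : PySem.Chars.isspace c = true) :
    pvScanB (c :: s) = pvScanB s := by
  cases s with
  | nil => simp [pvScanB, pvSpace_not_day h]
  | cons d rest => simp [pvScanB, pvSpace_not_day h, pvSpace_ne_T h]

theorem pvScanB_cons {c : Char} (s : List Char) (h : ¬(c = 'T' ∧ s.head? = some 'H')) :
    pvScanB (c :: s) = (if c ∈ pvDayChars then [String.ofList [c]] else []) ++ pvScanB s := by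
  cases s with
  | nil => simp [pvScanB]
  | cons d rest =>
    simp only [List.head?_cons, Option.some.injEq] at h
    simp only [pvScanB, h, if_false]
    split <;> simp

theorem pvScanB_append (l r : List Char)
    (hr : r = [] ∨ ∃ d rs, r = d :: rs ∧ PySem.Chars.isspace d = true) :
    pvScanB (l ++ r) = pvScanB l ++ pvScanB r := by
  induction l using pvScanB.induct with
  | case1 => simp [pvScanB]
  | case2 c hc =>
    rcases hr with rfl | ⟨d, rs, rfl, hd⟩
    · simp [pvScanB]
    · rw [List.singleton_append, pvScanB_cons]
      · simp [pvScanB, hc]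
      · rintro ⟨rfl, hh⟩
        rw [List.head?_cons, Option.some.injEq] at hh
        exact pvSpace_ne_H hd hh
  | case3 c hc =>
    rcases hr with rfl | ⟨d, rs, rfl, hd⟩
    · simp [pvScanB]
    · rw [List.singleton_append, pvScanB_cons]
      · simp [pvScanB, hc]
      · rintro ⟨rfl, hh⟩
        rw [List.head?_cons, Option.some.injEq] at hh
        exact pvSpace_ne_H hd hh
  | case4 c d rest h ih =>
    obtain ⟨rfl, rfl⟩ := h
    simp [pvScanB, ih]
  | case5 c d rest h hc ih =>
    simp only [List.cons_append] at *
    simp [pvScanB, h, hc, ih]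
  | case6 c d rest h hc ih =>
    simp only [List.cons_append] at *
    simp [pvScanB, h, hc, ih]

theorem pvScanA_eq (t : List Char) (i : Nat) (days : List String) :
    pvScanA t i days = days ++ pvScanB (t.drop i) := by
  induction i, days using pvScanA.induct t with
  | case1 i days h1 h2 ih =>
    have hdrop : t.drop i = t[i] :: t[i+1] :: t.drop (i + 2) := by
      rw [List.drop_eq_getElem_cons (Nat.lt_of_succ_lt h2.1), List.drop_eq_getElem_cons h2.1]
    have h2' := h2.2
    rw [hdrop] at h2'
    simp only [List.take, List.cons.injEq, and_true] at h2'
    rw [pvScanA]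
    simp only [h1, dif_pos, h2, if_pos]
    rw [ih, hdrop, h2'.1, h2'.2]
    simp [pvScanB]
  | case2 i days h1 h2 hmem ih =>
    have hdrop : t.drop i = t[i] :: t.drop (i + 1) := List.drop_eq_getElem_cons h1
    rw [pvScanA]
    simp only [h1, dif_pos, h2, if_neg, hmem, if_pos]
    rw [ih, hdrop, pvScanB_cons]
    · simp [hmem]
    · rintro ⟨hT, hH⟩
      by_cases hlt : i + 1 < t.length
      · rw [List.drop_eq_getElem_cons hlt, List.head?_cons, Option.some.injEq] at hH
        exact h2 ⟨hlt, by rw [hdrop, List.drop_eq_getElem_cons hlt]; simp [List.take, hT, hH]⟩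
      · rw [List.drop_eq_nil_of_le (Nat.le_of_not_lt hlt)] at hH
        simp at hH
  | case3 i days h1 h2 hmem ih =>
    have hdrop : t.drop i = t[i] :: t.drop (i + 1) := List.drop_eq_getElem_cons h1
    rw [pvScanA]
    simp only [h1, dif_pos, h2, if_neg, hmem, if_neg]
    rw [ih, hdrop, pvScanB_cons]
    · simp [hmem]
    · rintro ⟨hT, hH⟩
      by_cases hlt : i + 1 < t.length
      · rw [List.drop_eq_getElem_cons hlt, List.head?_cons, Option.some.injEq] at hH
        exact h2 ⟨hlt, by rw [hdrop, List.drop_eq_getElem_cons hlt]; simp [List.take, hT, hH]⟩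
      · rw [List.drop_eq_nil_of_le (Nat.le_of_not_lt hlt)] at hH
        simp at hH
  | case4 i days h1 =>
    rw [pvScanA]
    simp [h1, List.drop_eq_nil_of_le (Nat.le_of_not_lt h1), pvScanB]

theorem pvSetLast (l : List String) (a b : String) :
    (l ++ [a]).set ((l ++ [a]).length - 1) b = l ++ [b] := by
  induction l with
  | nil => rfl
  | cons x xs ih => simpa [List.set] using ih

theorem pvDropSpace (s : List Char) :
    s.dropWhile (fun ch => !PySem.Chars.isspace ch) = [] ∨
      ∃ d rs, s.dropWhile (fun ch => !PySem.Chars.isspace ch) = d :: rs ∧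
        PySem.Chars.isspace d = true := by
  induction s with
  | nil => exact Or.inl rfl
  | cons a s ih =>
    by_cases ha : PySem.Chars.isspace a
    · exact Or.inr ⟨a, s, by simp [List.dropWhile, ha], ha⟩
    · simpa [List.dropWhile, ha] using ih

theorem pvStep_eq (days : List String) (l : List Char) (hl : l ≠ []) :
    pvStepA days (String.ofList l) = days ++ pvScanB l := by
  unfold pvStepA
  have key : ∀ s : String, (String.ofList l = s) ↔ l = s.toList := fun s => by
    rw [String.ext_iff]; simp
  cases l with
  | nil => exact absurd rfl hl
  | cons c s =>
    cases s with
    | nil =>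
      simp only [key, show ("TH" : String).toList = ['T', 'H'] from by decide,
        show ("M" : String).toList = ['M'] from by decide,
        show ("T" : String).toList = ['T'] from by decide,
        show ("W" : String).toList = ['W'] from by decide,
        show ("F" : String).toList = ['F'] from by decide,
        show ("S" : String).toList = ['S'] from by decide,
        show ("U" : String).toList = ['U'] from by decide,
        List.cons.injEq, and_true, and_false, if_false, pvScanB]
      by_cases hT : c = 'T'
      · subst hT
        simp [pvSetLast, pvDayChars, show String.ofList ['T'] = "T" from by decide]
      · by_cases hc : c ∈ pvDayChars
        · have hmem : c = 'M' ∨ c = 'T' ∨ c = 'W' ∨ c = 'F' ∨ c = 'S' ∨ c = 'U' := by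
            simpa [pvDayChars] using hc
          have hor : c = 'M' ∨ c = 'W' ∨ c = 'F' ∨ c = 'S' ∨ c = 'U' := by tauto
          have hne : String.ofList [c] ≠ "T" := by
            intro he
            exact hT (by simpa [show ("T" : String).toList = ['T'] from by decide]
              using (key "T").mp he)
          simp [hor, hT, hc, hne]
        · have hor : ¬(c = 'M' ∨ c = 'T' ∨ c = 'W' ∨ c = 'F' ∨ c = 'S' ∨ c = 'U') := by
            simpa [pvDayChars] using hc
          simp [hor, hc, PySem.Str.len]
    | cons d rest =>
      have hsing : ∀ x : Char, (c :: d :: rest = [x]) = False := by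
        intro x; simp
      by_cases hTH : c = 'T' ∧ d = 'H' ∧ rest = []
      · obtain ⟨rfl, rfl, rfl⟩ := hTH
        simp [key, show ("TH" : String).toList = ['T', 'H'] from by decide, pvScanB]
      · have hne : ¬(c :: d :: rest = ['T', 'H']) := by
          intro he
          simp only [List.cons.injEq] at he
          exact hTH ⟨he.1, he.2.1, he.2.2⟩
        simp only [key, show ("TH" : String).toList = ['T', 'H'] from by decide,
          show ("M" : String).toList = ['M'] from by decide,
          show ("T" : String).toList = ['T'] from by decide,
          show ("W" : String).toList = ['W'] from by decide,
          show ("F" : String).toList = ['F'] from by decide,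
          show ("S" : String).toList = ['S'] from by decide,
          show ("U" : String).toList = ['U'] from by decide,
          hsing, hne, if_false, or_false, or_self]
        have hlen : (1 : Int) < PySem.Str.len (String.ofList (c :: d :: rest)) := by
          simp [PySem.Str.len] <;> omega
        rw [if_pos hlen]
        have htl : (String.ofList (c :: d :: rest)).toList = c :: d :: rest := by simp
        rw [htl, pvScanA_eq]
        simp

theorem pvFold_eq (u : List Char) (days : List String) :
    ((pvWsplit u).map String.ofList).foldl pvStepA days = days ++ pvScanB u := by
  induction u using pvWsplit.induct generalizing days with
  | case1 => simp [pvWsplit, pvScanB]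
  | case2 c s h ih =>
    rw [pvWsplit, if_pos h]
    rw [ih, pvScanB_space s h]
  | case3 c s h ih =>
    rw [pvWsplit, if_neg h]
    rw [List.map_cons, List.foldl_cons,
      pvStep_eq days (c :: s.takeWhile (fun ch => !PySem.Chars.isspace ch)) (by simp), ih]

    have hsplit : c :: s =
        (c :: s.takeWhile (fun ch => !PySem.Chars.isspace ch)) ++
          s.dropWhile (fun ch => !PySem.Chars.isspace ch) := by
      simp [List.takeWhile_append_dropWhile]
    rw [hsplit, pvScanB_append _ _ (pvDropSpace s)]
    simp

-- ===== VERDICT (by name: the statement is the Claim_ definition above) =====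
theorem parse_pattern_days_py_spec : Claim_equal_parse_pattern_days_py := by
  intro pattern _
  unfold Spec_parse_pattern_days_py parse_pattern_days_py parse_pattern_days_py_alt
  simp only [PySem.Str.split₀, pvSplit₀_eq, PySem.Str.toList_upper]
  simpa using pvFold_eq (PySem.Chars.upper pattern.toList) []
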